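-- pv_equiv track=rewrite | github.com/zackees/running-process | src/running_process/command_render.py | list2cmdline
-- ===== SOURCE A (Python) =====
-- def list2cmdline(command: list[str]) -> str:
--     parts: list[str] = []
--     for argument in command:
--         if not argument:
--             parts.append('""')
--             continue
--
--         need_quotes = any(character in " \t" for character in argument)
--         if not need_quotes and '"' not in argument and "\\" not in argument:
--             parts.append(argument)
--             continue
--
--         rendered: list[str] = ['"'] if need_quotes or '"' in argument or "\\" in argument else []
--         backslashes = 0
--         for character in argument:
--             if character == "\\":
--                 backslashes += 1
--                 continue
--             if character == '"':
--                 rendered.append("\\" * (backslashes * 2 + 1))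
--                 rendered.append('"')
--                 backslashes = 0
--                 continue
--             if backslashes:
--                 rendered.append("\\" * backslashes)
--                 backslashes = 0
--             rendered.append(character)
--         if backslashes:
--             rendered.append("\\" * (backslashes * 2 if rendered else backslashes))
--         if rendered and rendered[0] == '"':
--             rendered.append('"')
--         parts.append("".join(rendered) if rendered else argument)
--     return " ".join(parts)
-- ===== SOURCE B (Python) =====
-- def list2cmdline(command: list[str]) -> str:
--     return " ".join(_render(argument) for argument in command)
--
--
-- def _render(argument: str) -> str:
--     if not argument:
--         return '""'
--     if not any(c in ' \t"\\' for c in argument):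
--         return argument
--     # Scan right-to-left: a backslash is doubled exactly when only backslashes
--     # stand between it and a quote or the end of the string.
--     chunks: list[str] = []
--     doubling = True
--     for c in reversed(argument):
--         if c == '"':
--             chunks.append('\\"')
--             doubling = True
--         elif c == '\\':
--             chunks.append('\\\\' if doubling else '\\')
--         else:
--             chunks.append(c)
--             doubling = False
--     return '"' + "".join(reversed(chunks)) + '"'
-- ===== Notes on version B (the rewrite author's own statement) =====
-- stated objective: alternative
-- what changed: Replaces A's forward scan with a backslash-counting integer state machine (emitting buffered runs of 2n+1 or 2n backslashes) by a single right-to-left pass that carries only a boolean 'doubling' flag, doubling each backslash exactly when only backslashes stand between it and a quote or the end of the string.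
import Mathlib
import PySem

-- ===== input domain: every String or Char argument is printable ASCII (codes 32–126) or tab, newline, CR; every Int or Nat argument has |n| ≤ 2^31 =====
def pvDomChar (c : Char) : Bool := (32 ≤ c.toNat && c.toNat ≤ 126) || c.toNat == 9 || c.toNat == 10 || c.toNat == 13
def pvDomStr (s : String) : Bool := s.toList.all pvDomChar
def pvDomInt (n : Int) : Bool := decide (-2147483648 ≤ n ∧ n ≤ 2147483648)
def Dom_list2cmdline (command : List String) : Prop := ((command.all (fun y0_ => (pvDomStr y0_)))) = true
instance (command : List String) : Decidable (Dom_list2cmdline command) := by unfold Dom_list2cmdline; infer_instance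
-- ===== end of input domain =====

-- B replaces A's forward backslash-counting state machine by one right-to-left pass
-- with a boolean "doubling" flag (alternative decomposition; same cost).

-- ===== PORT A =====
-- '\\' * n
def repBS (n : Nat) : List Char := List.replicate n '\\'

-- one iteration of A's inner 'for character in argument' loop; state = (rendered, backslashes)
def stepA (st : List (List Char) × Nat) (c : Char) : List (List Char) × Nat :=
  if c = '\\' then (st.1, st.2 + 1)
  else if c = '"' then (st.1 ++ [repBS (st.2 * 2 + 1), ['"']], 0)
  else if st.2 ≠ 0 then (st.1 ++ [repBS st.2, [c]], 0)
  else (st.1 ++ [[c]], 0)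

-- A's epilogue after the inner loop: the trailing-backslash append, the closing quote,
-- and the final ''.join(rendered) if rendered else argument (''.join = flatten)
def finishA (argument : List Char) (st : List (List Char) × Nat) : List Char :=
  let rendered :=
    if st.2 ≠ 0 then st.1 ++ [repBS (if !st.1.isEmpty then st.2 * 2 else st.2)] else st.1
  let rendered2 :=
    if rendered ≠ [] ∧ rendered.head? = some ['"'] then rendered ++ [['"']] else rendered
  if !rendered2.isEmpty then rendered2.flatten else argument

-- A's loop body for one argument (strings handled as their char lists)
def renderA (argument : List Char) : List Char :=
  if argument.isEmpty then ['"', '"']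
  else
    let need_quotes := argument.any (fun c => c == ' ' || c == '\t')
    if !need_quotes && !(argument.contains '"') && !(argument.contains '\\') then argument
    else
      let r0 : List (List Char) :=
        if need_quotes || argument.contains '"' || argument.contains '\\' then [['"']] else []
      finishA argument (argument.foldl stepA (r0, 0))

def list2cmdline (command : List String) : String :=
  -- parts built by A's 'parts.append' loop; ' '.join via PySem.Chars.join (exact)
  let parts := command.foldl (fun acc a => acc ++ [renderA a.toList]) ([] : List (List Char))
  String.mk (PySem.Chars.join [' '] parts)

-- ===== PORT B =====
-- one iteration of B's 'for c in reversed(argument)' loop; state = (chunks, doubling)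
def stepB (st : List (List Char) × Bool) (c : Char) : List (List Char) × Bool :=
  if c = '"' then (st.1 ++ [['\\', '"']], true)
  else if c = '\\' then (st.1 ++ [if st.2 then ['\\', '\\'] else ['\\']], st.2)
  else (st.1 ++ [[c]], false)

-- B's _render (strings as char lists; ''.join(reversed(chunks)) = flatten of reversed list)
def renderB (argument : List Char) : List Char :=
  if argument.isEmpty then ['"', '"']
  else if !(argument.any (fun c => c == ' ' || c == '\t' || c == '"' || c == '\\')) then argument
  else
    let st := argument.reverse.foldl stepB ([], true)
    '"' :: (PySem.Chars.join [] st.1.reverse) ++ ['"']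

def list2cmdline_alt (command : List String) : String :=
  String.mk (PySem.Chars.join [' '] (command.map (fun a => renderB a.toList)))

-- ===== PRECONDITION & SPEC =====
def Spec_list2cmdline (command : List String) (out : String) : Prop := out = list2cmdline_alt command
instance (command : List String) (out : String) : Decidable (Spec_list2cmdline command out) := by unfold Spec_list2cmdline; infer_instance

-- ===== CLAIM (what is proved, stated in full; the proofs are below) =====
def Claim_equal_list2cmdline : Prop := ∀ (command : List String), Dom_list2cmdline command → Spec_list2cmdline command (list2cmdline command)

-- ===== LEMMAS AND PROOFS =====

-- canonical escaped body: forward recursion with pending-backslash count n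
def F : List Char → Nat → List Char
  | [], n => repBS (2 * n)
  | c :: r, n =>
    if c = '\\' then F r (n + 1)
    else if c = '"' then repBS (2 * n + 1) ++ '"' :: F r 0
    else repBS n ++ c :: F r 0

-- B's machine as a structural recursion (value of the right-to-left pass)
def NB : List Char → List Char × Bool
  | [] => ([], true)
  | c :: r =>
    let p := NB r
    if c = '"' then ('\\' :: '"' :: p.1, true)
    else if c = '\\' then ((if p.2 then ['\\', '\\'] else ['\\']) ++ p.1, p.2)
    else (c :: p.1, false)

theorem join_nil_flatten (ps : List (List Char)) : PySem.Chars.join [] ps = ps.flatten := by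
  induction ps with
  | nil => rfl
  | cons p ps ih =>
    cases ps with
    | nil => simp [PySem.Chars.join, List.intercalate]
    | cons q qs =>
      simp only [PySem.Chars.join, List.intercalate] at ih ⊢
      simp [List.intersperse] at ih ⊢
      simpa using ih

theorem stepA_extract (acc : List (List Char)) (n : Nat) (c : Char) :
    stepA (acc, n) c = (acc ++ (stepA ([], n) c).1, (stepA ([], n) c).2) := by
  unfold stepA
  split_ifs <;> simp

theorem foldl_stepA_extract (l : List Char) (acc : List (List Char)) (n : Nat) :
    l.foldl stepA (acc, n) = (acc ++ (l.foldl stepA ([], n)).1, (l.foldl stepA ([], n)).2) := by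
  induction l generalizing acc n with
  | nil => simp
  | cons c r ih =>
    rcases hs : stepA ([], n) c with ⟨y, m⟩
    rw [List.foldl_cons, List.foldl_cons, stepA_extract acc n c, hs]
    rw [ih (acc ++ y) m, ih y m]
    simp

theorem A1 (l : List Char) (n : Nat) :
    (l.foldl stepA ([], n)).1.flatten ++ repBS (2 * (l.foldl stepA ([], n)).2) = F l n := by
  induction l generalizing n with
  | nil => simp [F]
  | cons c r ih =>
    simp only [List.foldl_cons]
    by_cases hb : c = '\\'
    · subst hb
      simp only [stepA, if_pos rfl, F]
      exact ih (n + 1)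
    · by_cases hq : c = '"'
      · subst hq
        have h1 : stepA (([] : List (List Char)), n) '"' = ([repBS (n * 2 + 1), ['"']], 0) := by
          simp [stepA]
        rw [h1, foldl_stepA_extract r [repBS (n * 2 + 1), ['"']] 0]
        have h2 : F ('"' :: r) n = repBS (2 * n + 1) ++ '"' :: F r 0 := by
          simp [F]
        rw [h2, ← ih 0]
        simp [repBS, Nat.mul_comm]
      · have h1 : stepA (([] : List (List Char)), n) c =
            (if n ≠ 0 then [repBS n, [c]] else [[c]], 0) := by
          simp [stepA, hb, hq]
          split_ifs <;> simp
        have h2 : F (c :: r) n = repBS n ++ c :: F r 0 := by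
          simp [F, hb, hq]
        rw [h1, h2, ← ih 0]
        by_cases hn : n = 0
        · subst hn
          rw [if_neg (by simp)]
          rw [foldl_stepA_extract r [[c]] 0]
          simp [repBS]
        · rw [if_pos hn]
          rw [foldl_stepA_extract r [repBS n, [c]] 0]
          simp

theorem B1 (l : List Char) :
    (List.foldr (fun x y => stepB y x) (([], true) : List (List Char) × Bool) l).1.reverse.flatten
        = (NB l).1 ∧
    (List.foldr (fun x y => stepB y x) (([], true) : List (List Char) × Bool) l).2 = (NB l).2 := by
  induction l with
  | nil => exact ⟨rfl, rfl⟩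
  | cons c r ih =>
    obtain ⟨ih1, ih2⟩ := ih
    rcases hst : List.foldr (fun x y => stepB y x) (([], true) : List (List Char) × Bool) r
      with ⟨ch, d⟩
    rw [hst] at ih1 ih2
    simp only [List.foldr_cons, hst]
    by_cases hq : c = '"'
    · subst hq
      refine ⟨?_, ?_⟩ <;> simp [stepB, NB, ih1, ih2]
    · by_cases hb : c = '\\'
      · subst hb
        have hd : (NB r).2 = d := ih2.symm
        refine ⟨?_, ?_⟩
        · cases d <;> simp [stepB, NB, hd, ih1]
        · simp [stepB, NB, hd]
      · refine ⟨?_, ?_⟩ <;> simp [stepB, NB, hq, hb, ih1]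

theorem FN (l : List Char) (n : Nat) :
    F l n = repBS (if (NB l).2 then 2 * n else n) ++ (NB l).1 := by
  induction l generalizing n with
  | nil => simp [F, NB]
  | cons c r ih =>
    by_cases hb : c = '\\'
    · subst hb
      simp only [F, NB, reduceIte]
      rw [ih (n + 1)]
      cases h : (NB r).2
      · simp [repBS, List.replicate_succ', List.append_assoc]
      · simp [h, repBS]
        rw [show 2 * (n + 1) = 2 * n + 1 + 1 by ring, List.replicate_succ', List.replicate_succ']
        simp
    · by_cases hq : c = '"'
      · simp only [F, if_neg hb, hq, if_pos rfl, NB]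
        rw [ih 0]
        cases h : (NB r).2 <;> simp [h, repBS, List.replicate_succ']
      · simp only [F, if_neg hb, if_neg hq, NB]
        rw [ih 0]
        cases h : (NB r).2 <;> simp [h, repBS]

theorem guards_eq (l : List Char) :
    (!(l.any fun c => c == ' ' || c == '\t') && !(l.contains '"') && !(l.contains '\\')) =
      !(l.any fun c => c == ' ' || c == '\t' || c == '"' || c == '\\') := by
  induction l with
  | nil => rfl
  | cons c r ih =>
    simp only [List.any_cons, List.contains_cons, Bool.not_or, ← ih]
    cases h1 : (c == ' ') <;> cases h2 : (c == '\t') <;> cases h3 : ('"' == c) <;>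
      cases h4 : ('\\' == c) <;>
      simp_all [BEq.comm]

theorem finishA_eq (arg : List Char) (r1 : List (List Char)) (m : Nat) :
    finishA arg (['"'] :: r1, m) = '"' :: (r1.flatten ++ repBS (2 * m)) ++ ['"'] := by
  unfold finishA
  by_cases hm : m = 0
  · subst hm
    simp [repBS]
  · rw [if_pos hm]
    simp [repBS, Nat.mul_comm]

theorem render_eq (l : List Char) : renderA l = renderB l := by
  by_cases he : l.isEmpty
  · simp [renderA, renderB, he]
  · by_cases hg : (!(l.any fun c => c == ' ' || c == '\t') && !(l.contains '"') && !(l.contains '\\')) = true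
    · have hg' := hg
      rw [guards_eq] at hg'
      simp only [renderA, renderB, if_neg he, Bool.not_eq_eq_eq_not, Bool.not_true] at *
      rw [if_pos hg, if_pos hg']
    · have hg' := hg
      rw [guards_eq] at hg'
      have hcond : (l.any fun c => c == ' ' || c == '\t') || l.contains '"' || l.contains '\\' := by
        revert hg
        cases (l.any fun c => c == ' ' || c == '\t') <;> cases l.contains '"' <;>
          cases l.contains '\\' <;> simp
      simp only [renderA, renderB, if_neg he, if_neg hg, if_neg hg', if_pos hcond]
      rw [foldl_stepA_extract l [['"']] 0, List.singleton_append, finishA_eq, A1 l 0, FN l 0,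
        join_nil_flatten, List.foldl_reverse, (B1 l).1]
      cases h : (NB l).2 <;> simp [h, repBS]

theorem parts_eq (command : List String) :
    command.foldl (fun acc a => acc ++ [renderA a.toList]) ([] : List (List Char)) =
      command.map (fun a => renderB a.toList) := by
  have gen : ∀ (cs : List String) (acc : List (List Char)),
      cs.foldl (fun acc a => acc ++ [renderA a.toList]) acc =
        acc ++ cs.map (fun a => renderB a.toList) := by
    intro cs
    induction cs with
    | nil => simp
    | cons c r ih =>
      intro acc
      rw [List.foldl_cons, ih, List.map_cons, render_eq]
      simp
  simpa using gen command []

-- ===== VERDICT (by name: the statement is the Claim_ definition above) =====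
theorem list2cmdline_spec : Claim_equal_list2cmdline := by
  intro command _
  unfold Spec_list2cmdline list2cmdline list2cmdline_alt
  rw [parts_eq]
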